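-- pv_equiv track=rewrite | github.com/Sherouz/80-days-of-challenges | scripts/counting_sort_by_zeros.py | counting_sort_by_zeros
-- ===== SOURCE A (Python) =====
-- def count_zeros(n: int) -> int:
--     """Return number of '0' digits in the integer."""
--     return str(n).count("0")
--
-- def counting_sort_by_zeros(nums: list[int]) -> list[int]:
--     """Sort numbers by the count of zeros using counting sort."""
--     buckets = {}                      # map zero-count -> list of numbers
--
--     for num in nums:
--         z = count_zeros(num)          # count zeros in current number
--         if z not in buckets:
--             buckets[z] = []
--         buckets[z].append(num)        # place number in its bucket
--
--     result = []
--
--     for z in sorted(buckets.keys()):  # iterate in increasing zero-count order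
--         result.extend(buckets[z])     # append numbers in each bucket
--
--     return result
-- ===== SOURCE B (Python) =====
-- def count_zeros(n: int) -> int:
--     """Return number of '0' digits in the integer."""
--     return str(n).count("0")
--
-- def counting_sort_by_zeros(nums: list[int]) -> list[int]:
--     """Sort numbers by the count of zeros using a stable comparison sort."""
--     return sorted(nums, key=count_zeros)
-- ===== Notes on version B (the rewrite author's own statement) =====
-- stated objective: idiomatic
-- what changed: Replaces the hand-rolled counting sort (bucket dict keyed by zero-count, then concatenation over sorted keys) by a single stable sorted() call with count_zeros as key; stability of Timsort reproduces the bucket tie order exactly.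
import Mathlib
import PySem

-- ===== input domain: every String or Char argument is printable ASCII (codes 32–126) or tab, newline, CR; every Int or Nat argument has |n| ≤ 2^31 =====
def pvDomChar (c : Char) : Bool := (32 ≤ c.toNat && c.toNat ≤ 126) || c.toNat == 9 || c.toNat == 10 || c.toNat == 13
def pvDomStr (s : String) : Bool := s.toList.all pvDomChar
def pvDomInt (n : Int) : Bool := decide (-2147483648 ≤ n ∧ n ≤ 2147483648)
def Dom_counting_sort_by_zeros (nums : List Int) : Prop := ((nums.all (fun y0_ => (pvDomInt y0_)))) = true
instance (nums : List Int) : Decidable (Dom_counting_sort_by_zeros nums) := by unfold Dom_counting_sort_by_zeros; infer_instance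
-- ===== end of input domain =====

-- B replaces A's hand-rolled counting sort (bucket dict + concatenation over sorted keys) by one
-- stable sorted() call keyed on the zero-digit count; same result, more idiomatic.

-- ===== PORT A =====
-- count_zeros(n) = str(n).count("0")  (shared module helper, used by both A and B)
def count_zeros (n : Int) : Int :=
  (PySem.Str.count (PySem.Int.toStr n) "0" : Int)

def counting_sort_by_zeros (nums : List Int) : List Int :=
  -- buckets = {}; for num in nums: z = count_zeros(num); if z not in buckets: buckets[z] = []; buckets[z].append(num)
  let buckets : PySem.Dict Int (List Int) :=
    nums.foldl (fun d num =>
      let z := count_zeros num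
      let d := if d.contains z then d else d.insert z []
      d.modify z [] (fun l => l ++ [num])) PySem.Dict.empty
  -- result = []; for z in sorted(buckets.keys()): result.extend(buckets[z])
  (PySem.List.sorted buckets.keys (fun k => k)).foldl
    (fun res z => res ++ buckets.getD z []) []

-- ===== PORT B =====
-- return sorted(nums, key=count_zeros)
def counting_sort_by_zeros_alt (nums : List Int) : List Int :=
  PySem.List.sorted nums count_zeros

-- ===== PRECONDITION & SPEC =====
def Spec_counting_sort_by_zeros (nums : List Int) (out : List Int) : Prop := out = counting_sort_by_zeros_alt nums
instance (nums : List Int) (out : List Int) : Decidable (Spec_counting_sort_by_zeros nums out) := by unfold Spec_counting_sort_by_zeros; infer_instance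

-- ===== CLAIM (what is proved, stated in full; the proofs are below) =====
def Claim_equal_counting_sort_by_zeros : Prop := ∀ (nums : List Int), Dom_counting_sort_by_zeros nums → Spec_counting_sort_by_zeros nums (counting_sort_by_zeros nums)

-- ===== LEMMAS AND PROOFS =====

-- two consecutive inserts at the same (fresh) key keep only the second value
theorem insert_insert_of_not_contains (d : PySem.Dict Int (List Int)) (k : Int)
    (v w : List Int) (h : d.contains k = false) :
    (d.insert k v).insert k w = d.insert k w := by
  apply PySem.Dict.ext
  have hnot : ∀ p ∈ d.items, ¬ (p.1 == k) = true := List.any_eq_false.mp h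
  have e1 : (d.insert k v).items = d.items ++ [(k, v)] := by
    simp [PySem.Dict.insert, h]
  have hc1 : (d.insert k v).contains k = true := by
    simp [PySem.Dict.contains, e1]
  have e2 : (d.insert k w).items = d.items ++ [(k, w)] := by
    simp [PySem.Dict.insert, h]
  have ins_items_pos : ∀ (D : PySem.Dict Int (List Int)), D.contains k = true →
      (D.insert k w).items = D.items.map (fun p => if (p.1 == k) = true then (k, w) else p) := by
    intro D hD
    simp [PySem.Dict.insert, hD]
  rw [ins_items_pos (d.insert k v) hc1, e1, e2, List.map_append]
  congr 1
  · have hid : ∀ p ∈ d.items, (if (p.1 == k) = true then (k, w) else p) = p :=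
      fun p hp => if_neg (hnot p hp)
    exact (List.map_congr_left hid).trans (List.map_id' d.items)
  · simp

-- A's per-element step (conditional bucket creation, then append) collapses to one Dict.modify.
theorem stepA_eq (d : PySem.Dict Int (List Int)) (num : Int) :
    (let z := count_zeros num
     let d' := if d.contains z then d else d.insert z []
     d'.modify z [] (fun l => l ++ [num]))
      = d.modify (count_zeros num) [] (fun l => l ++ [num]) := by
  set z := count_zeros num with hz
  by_cases h : d.contains z
  · simp [h]
  · have hfalse : d.contains z = false := by simpa using h
    have hget : d.get? z = none := (PySem.Dict.get?_eq_none_iff_contains d z).mpr hfalse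
    have e2 : (d.insert z ([] : List Int)).getD z [] = [] := by
      simp [PySem.Dict.getD, PySem.Dict.get?_insert_self]
    have e3 : d.getD z [] = [] := by
      simp [PySem.Dict.getD, hget]
    simp only [hfalse, Bool.false_eq_true, if_false, PySem.Dict.modify, e2, e3]
    exact insert_insert_of_not_contains d z [] ([] ++ [num]) hfalse

-- the bucket dict as one modify-fold
theorem bucketsA_eq (nums : List Int) :
    nums.foldl (fun d num =>
      let z := count_zeros num
      let d := if d.contains z then d else d.insert z []
      d.modify z [] (fun l => l ++ [num])) PySem.Dict.empty
    = nums.foldl (fun d num => d.modify (count_zeros num) [] (fun l => l ++ [num]))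
        PySem.Dict.empty := by
  have : (fun (d : PySem.Dict Int (List Int)) num =>
      let z := count_zeros num
      let d := if d.contains z then d else d.insert z []
      d.modify z [] (fun l => l ++ [num]))
      = fun d num => d.modify (count_zeros num) [] (fun l => l ++ [num]) := by
    funext d num; exact stepA_eq d num
  rw [this]

-- each bucket holds exactly the elements with that zero-count, in input order
theorem bucket_getD (nums : List Int) (z : Int) :
    (nums.foldl (fun d num => d.modify (count_zeros num) [] (fun l => l ++ [num]))
        (PySem.Dict.empty : PySem.Dict Int (List Int))).getD z []
      = nums.filter (fun n => count_zeros n == z) := by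
  have h := PySem.Dict.getD_foldl_modify_append (nums.map (fun n => (count_zeros n, n)))
      (PySem.Dict.empty : PySem.Dict Int (List Int)) z
  rw [List.foldl_map] at h
  simp only [h]
  have hempty : (PySem.Dict.empty : PySem.Dict Int (List Int)).getD z [] = [] := rfl
  rw [hempty, List.nil_append, List.filter_map]
  simp [Function.comp_def]

theorem contains_keys {ν : Type} (d : PySem.Dict Int ν) (z : Int) :
    d.keys.contains z = d.contains z := by
  rw [Bool.eq_iff_iff, List.contains_iff_mem]
  simp only [PySem.Dict.keys, PySem.Dict.contains, List.any_eq_true, List.mem_map, beq_iff_eq]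

theorem mem_keys_iff_contains {ν : Type} (d : PySem.Dict Int ν) (z : Int) :
    z ∈ d.keys ↔ d.contains z = true := by
  rw [← List.contains_iff_mem, contains_keys]

theorem keys_modify_append (d : PySem.Dict Int (List Int)) (z : Int) (f : List Int → List Int) :
    (d.modify z [] f).keys = if d.contains z then d.keys else d.keys ++ [z] := by
  simp only [PySem.Dict.modify, PySem.Dict.insert]
  by_cases h : d.contains z
  · simp only [h, if_true, PySem.Dict.keys, List.map_map]
    refine List.map_congr_left ?_
    intro p _
    by_cases hp : (p.1 == z) = true
    · simp [Function.comp, (eq_of_beq hp).symm]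
    · simp [Function.comp, hp]
  · simp [h, PySem.Dict.keys]

-- the key list of the bucket dict is the ordered set of zero-counts seen
theorem keys_fold (nums : List Int) : ∀ (d : PySem.Dict Int (List Int)),
    (nums.foldl (fun d num => d.modify (count_zeros num) [] (fun l => l ++ [num])) d).keys
      = (nums.map count_zeros).foldl PySem.Set.add d.keys := by
  induction nums with
  | nil => intro d; rfl
  | cons n ns ih =>
    intro d
    simp only [List.foldl_cons, List.map_cons, ih]
    congr 1
    rw [keys_modify_append]
    simp only [PySem.Set.add]
    by_cases h : d.contains (count_zeros n)
    · have h' : count_zeros n ∈ d.keys := (mem_keys_iff_contains d _).mpr h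
      simp [h, h']
    · have h' : count_zeros n ∉ d.keys := fun hm =>
        absurd ((mem_keys_iff_contains d _).mp hm) h
      simp [h, h']

theorem buckets_keys (nums : List Int) :
    (nums.foldl (fun d num => d.modify (count_zeros num) [] (fun l => l ++ [num]))
        (PySem.Dict.empty : PySem.Dict Int (List Int))).keys
      = PySem.Set.ofList (nums.map count_zeros) := by
  rw [keys_fold]
  rfl

-- inserting into a key-sorted list: the elements with a given zero-count, in order
theorem insertBy_filter (z x : Int) (ws : List Int)
    (hw : ws.Pairwise (fun a b => count_zeros a ≤ count_zeros b)) :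
    (PySem.List.insertBy (fun a b => decide (count_zeros a < count_zeros b)) x ws).filter
        (fun n => count_zeros n == z)
      = if count_zeros x = z then ws.filter (fun n => count_zeros n == z) ++ [x]
        else ws.filter (fun n => count_zeros n == z) := by
  induction ws with
  | nil =>
    by_cases h : count_zeros x = z <;>
      simp [PySem.List.insertBy, h]
  | cons y ys ih =>
    have hy1 : ∀ b ∈ ys, count_zeros y ≤ count_zeros b := (List.pairwise_cons.mp hw).1
    have hys : ys.Pairwise (fun a b => count_zeros a ≤ count_zeros b) :=
      (List.pairwise_cons.mp hw).2
    rw [show PySem.List.insertBy (fun a b => decide (count_zeros a < count_zeros b)) x (y :: ys)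
        = if decide (count_zeros x < count_zeros y) then x :: y :: ys
          else y :: PySem.List.insertBy (fun a b => decide (count_zeros a < count_zeros b)) x ys
        from rfl]
    by_cases hlt : count_zeros x < count_zeros y
    · simp only [hlt, decide_true, if_true]
      have hnil : (y :: ys).filter (fun n => count_zeros n == count_zeros x) = [] := by
        rw [List.filter_eq_nil_iff]
        intro a ha hax
        have : count_zeros y ≤ count_zeros a := by
          rcases List.mem_cons.mp ha with rfl | ha'
          · exact le_refl _
          · exact hy1 a ha'
        have heq := eq_of_beq hax
        omega
      by_cases h : count_zeros x = z
      · subst h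
        rw [List.filter_cons_of_pos (by simp), hnil]
        simp
      · rw [List.filter_cons_of_neg (by simp [h])]
        simp [h]
    · simp only [hlt, decide_false, if_false, Bool.false_eq_true]
      rw [List.filter_cons, List.filter_cons, ih hys]
      by_cases h : count_zeros x = z <;> by_cases hyz : (count_zeros y == z) = true <;>
        simp [h, hyz]

-- stability: sorting does not change the subsequence of any fixed zero-count
theorem filter_sorted (xs : List Int) (z : Int) :
    (PySem.List.sorted xs count_zeros).filter (fun n => count_zeros n == z)
      = xs.filter (fun n => count_zeros n == z) := by
  induction xs using List.reverseRecOn with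
  | nil => simp [PySem.List.sorted_eq_foldl_insertBy]
  | append_singleton xs x ih =>
    rw [PySem.List.sorted_eq_foldl_insertBy, List.foldl_append, List.foldl_cons, List.foldl_nil,
      ← PySem.List.sorted_eq_foldl_insertBy]
    rw [insertBy_filter z x _ (PySem.List.sorted_pairwise xs count_zeros)]
    rw [List.filter_append, List.filter_cons]
    by_cases h : count_zeros x = z
    · simp [h, ih]
    · simp [h, ih]

-- uniqueness of the key-stable arrangement: two key-sorted lists with the same
-- per-key subsequences are equal
theorem eq_of_sorted_filters (ys : List Int) : ∀ (zs : List Int),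
    ys.Pairwise (fun a b => count_zeros a ≤ count_zeros b) →
    zs.Pairwise (fun a b => count_zeros a ≤ count_zeros b) →
    (∀ z, ys.filter (fun n => count_zeros n == z) = zs.filter (fun n => count_zeros n == z)) →
    ys = zs := by
  induction ys with
  | nil =>
    intro zs _ _ hf
    cases zs with
    | nil => rfl
    | cons w zs' =>
      have := hf (count_zeros w)
      rw [List.filter_nil, List.filter_cons_of_pos (by simp)] at this
      exact absurd this (by simp)
  | cons y ys' ih =>
    intro zs hy hz hf
    cases zs with
    | nil =>
      have := hf (count_zeros y)
      rw [List.filter_nil, List.filter_cons_of_pos (by simp)] at this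
      exact absurd this (by simp)
    | cons w zs' =>
      have hy1 : ∀ b ∈ ys', count_zeros y ≤ count_zeros b := (List.pairwise_cons.mp hy).1
      have hw1 : ∀ b ∈ zs', count_zeros w ≤ count_zeros b := (List.pairwise_cons.mp hz).1
      have hys' := (List.pairwise_cons.mp hy).2
      have hzs' := (List.pairwise_cons.mp hz).2
      have hwmem : w ∈ (y :: ys').filter (fun n => count_zeros n == count_zeros w) := by
        rw [hf, List.filter_cons_of_pos (by simp)]; exact (by simp)
      have hymem : y ∈ (w :: zs').filter (fun n => count_zeros n == count_zeros y) := by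
        rw [← hf, List.filter_cons_of_pos (by simp)]; exact (by simp)
      have hkey : count_zeros y = count_zeros w := by
        have h1 : count_zeros y ≤ count_zeros w := by
          rcases List.mem_cons.mp (List.mem_of_mem_filter hwmem) with h | h
          · subst h; exact le_refl _
          · exact hy1 w h
        have h2 : count_zeros w ≤ count_zeros y := by
          rcases List.mem_cons.mp (List.mem_of_mem_filter hymem) with h | h
          · subst h; exact le_refl _
          · exact hw1 y h
        omega
      have hfy := hf (count_zeros y)
      rw [List.filter_cons_of_pos (by simp), List.filter_cons_of_pos (by simp [hkey])] at hfy
      have hyw : y = w := (List.cons_eq_cons.mp hfy).1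
      have htail : ys'.filter (fun n => count_zeros n == count_zeros y)
          = zs'.filter (fun n => count_zeros n == count_zeros y) := (List.cons_eq_cons.mp hfy).2
      have hf' : ∀ z, ys'.filter (fun n => count_zeros n == z)
          = zs'.filter (fun n => count_zeros n == z) := by
        intro z
        by_cases hzy : z = count_zeros y
        · rw [hzy]; exact htail
        · have := hf z
          rw [List.filter_cons_of_neg (by simp; omega), List.filter_cons_of_neg (by
            simp [← hyw]; omega)] at this
          exact this
      rw [hyw, ih zs' hys' hzs' hf']

-- the bucket concatenation is key-sorted
theorem flat_pairwise (nums : List Int) (ks : List Int)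
    (hks : ks.Pairwise (· < ·)) :
    (ks.flatMap (fun z => nums.filter (fun n => count_zeros n == z))).Pairwise
      (fun a b => count_zeros a ≤ count_zeros b) := by
  induction ks with
  | nil => simp
  | cons k ks' ih =>
    have hk1 : ∀ z ∈ ks', k < z := (List.pairwise_cons.mp hks).1
    have hks' := (List.pairwise_cons.mp hks).2
    rw [List.flatMap_cons]
    rw [List.pairwise_append]
    refine ⟨?_, ih hks', ?_⟩
    · apply List.pairwise_of_forall_mem_list
      intro a ha b hb
      have : count_zeros a = k := eq_of_beq (List.mem_filter.mp ha).2
      have : count_zeros b = k := eq_of_beq (List.mem_filter.mp hb).2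
      omega
    · intro a ha b hb
      have hak : count_zeros a = k := eq_of_beq (List.mem_filter.mp ha).2
      rcases List.mem_flatMap.mp hb with ⟨z, hzk, hbz⟩
      have hbk : count_zeros b = z := eq_of_beq (List.mem_filter.mp hbz).2
      have := hk1 z hzk
      omega

-- filtering the bucket concatenation recovers one bucket
theorem filter_flatMap (nums : List Int) (w : Int) : ∀ (ks : List Int),
    ks.Pairwise (· < ·) →
    (ks.flatMap (fun z => nums.filter (fun n => count_zeros n == z))).filter
        (fun n => count_zeros n == w)
      = if w ∈ ks then nums.filter (fun n => count_zeros n == w) else [] := by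
  intro ks
  induction ks with
  | nil => simp
  | cons k ks' ih =>
    intro hks
    have hk1 : ∀ z ∈ ks', k < z := (List.pairwise_cons.mp hks).1
    have hks' := (List.pairwise_cons.mp hks).2
    rw [List.flatMap_cons, List.filter_append, ih hks', List.filter_filter]
    by_cases hwk : w = k
    · have hknot : k ∉ ks' := fun h => absurd (hk1 k h) (lt_irrefl k)
      subst hwk
      rw [if_neg hknot, if_pos (by simp), List.append_nil]
      refine List.filter_congr ?_
      intro n _
      exact Bool.and_self _
    · have : (nums.filter (fun n => (count_zeros n == w) && (count_zeros n == k))) = [] := by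
        rw [List.filter_eq_nil_iff]
        intro n _ h
        have h1 := eq_of_beq (Bool.and_elim_left h)
        have h2 := eq_of_beq (Bool.and_elim_right h)
        omega
      rw [this, List.nil_append]
      by_cases h : w ∈ ks'
      · rw [if_pos h, if_pos (List.mem_cons.mpr (Or.inr h))]
      · rw [if_neg h, if_neg (by simp [hwk, h])]

-- A computes the bucket concatenation over the sorted distinct zero-counts
theorem A_eq_flat (nums : List Int) :
    counting_sort_by_zeros nums
      = (PySem.List.sorted (PySem.Set.ofList (nums.map count_zeros)) (fun k => k)).flatMap
          (fun z => nums.filter (fun n => count_zeros n == z)) := by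
  show (PySem.List.sorted ((nums.foldl (fun d num =>
      let z := count_zeros num
      let d := if d.contains z then d else d.insert z []
      d.modify z [] (fun l => l ++ [num])) PySem.Dict.empty)).keys (fun k => k)).foldl
      (fun res z => res ++ (nums.foldl (fun d num =>
      let z := count_zeros num
      let d := if d.contains z then d else d.insert z []
      d.modify z [] (fun l => l ++ [num])) PySem.Dict.empty).getD z []) []
    = _
  rw [bucketsA_eq, buckets_keys, PySem.List.foldl_append_eq_flatMap, List.nil_append]
  congr 1
  funext z
  exact bucket_getD nums z

-- B computes the same list
theorem B_eq_flat (nums : List Int) :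
    counting_sort_by_zeros_alt nums
      = (PySem.List.sorted (PySem.Set.ofList (nums.map count_zeros)) (fun k => k)).flatMap
          (fun z => nums.filter (fun n => count_zeros n == z)) := by
  unfold counting_sort_by_zeros_alt
  have hks : (PySem.List.sorted (PySem.Set.ofList (nums.map count_zeros))
      (fun k => k)).Pairwise (· < ·) := PySem.List.sorted_ofList_pairwise_lt _
  refine eq_of_sorted_filters _ _ (PySem.List.sorted_pairwise nums count_zeros)
    (flat_pairwise nums _ hks) ?_
  intro z
  rw [filter_sorted, filter_flatMap nums z _ hks]
  by_cases h : z ∈ PySem.List.sorted (PySem.Set.ofList (nums.map count_zeros)) (fun k => k)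
  · rw [if_pos h]
  · rw [if_neg h, List.filter_eq_nil_iff]
    intro n hn hcz
    apply h
    rw [PySem.List.mem_sorted, PySem.Set.mem_ofList]
    exact List.mem_map.mpr ⟨n, hn, eq_of_beq hcz⟩

-- ===== VERDICT (by name: the statement is the Claim_ definition above) =====
theorem counting_sort_by_zeros_spec : Claim_equal_counting_sort_by_zeros := by
  intro nums _
  unfold Spec_counting_sort_by_zeros
  rw [A_eq_flat, B_eq_flat]
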